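-- pv_equiv track=rewrite | github.com/utep-cs-systems-courses/s26-os-shell-NenJuJutsu | shell.py | split_pipeline
-- ===== SOURCE A (Python) =====
-- def split_pipeline(tokens: list[str]) -> list[list[str]]:
--     segs: list[list[str]] = []
--     cur: list[str] = []
--     for t in tokens:
--         if t == "|":
--             if not cur:
--                 raise ValueError("missing command before |")
--             segs.append(cur)
--             cur = []
--         else:
--             cur.append(t)
--     if not cur:
--         raise ValueError("missing command after |")
--     segs.append(cur)
--     return segs
-- ===== SOURCE B (Python) =====
-- def split_pipeline(tokens: list[str]) -> list[list[str]]: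
--     segs: list[list[str]] = []
--     rest = tokens
--     while "|" in rest:
--         i = rest.index("|")
--         head, rest = rest[:i], rest[i + 1:]
--         if not head:
--             raise ValueError("missing command before |")
--         segs.append(head)
--     if not rest:
--         raise ValueError("missing command after |")
--     segs.append(rest)
--     return segs
-- ===== Notes on version B (the rewrite author's own statement) =====
-- stated objective: alternative
-- what changed: B replaces A's token-by-token scan with a current-segment accumulator by repeated splitting at the first '|' via index/slicing (jump from pipe to pipe); same ValueError messages on malformed input, which Pre_ excludes.
import Mathlib
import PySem

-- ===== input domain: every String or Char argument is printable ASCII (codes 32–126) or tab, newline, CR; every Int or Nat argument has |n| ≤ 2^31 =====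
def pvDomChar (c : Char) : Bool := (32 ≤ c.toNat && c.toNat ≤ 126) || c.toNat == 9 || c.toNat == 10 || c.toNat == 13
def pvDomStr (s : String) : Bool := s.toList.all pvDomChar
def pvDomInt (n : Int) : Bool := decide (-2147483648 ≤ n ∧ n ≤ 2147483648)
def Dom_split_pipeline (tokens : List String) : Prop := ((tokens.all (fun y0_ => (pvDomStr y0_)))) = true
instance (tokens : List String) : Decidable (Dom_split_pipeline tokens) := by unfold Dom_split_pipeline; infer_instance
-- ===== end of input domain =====

-- B replaces A's token-by-token scan (current-segment accumulator) by repeated splitting at the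
-- first '|' found with list.index and slicing; same results and same ValueError messages (objective: alternative).

-- ===== PORT A =====
-- A's for-loop over tokens with state (segs, cur); Python's two ValueError paths return [] here,
-- and exactly those inputs are excluded by Pre_split_pipeline below.
def goA : List String → List (List String) → List String → List (List String)
  | [], segs, cur => if cur = [] then [] else segs ++ [cur]
  | t :: ts, segs, cur =>
    if t = "|" then
      if cur = [] then [] else goA ts (segs ++ [cur]) []
    else goA ts segs (cur ++ [t])

def split_pipeline (tokens : List String) : List (List String) :=
  goA tokens [] []

-- ===== PORT B =====
-- B's while-loop: while "|" in rest, split at rest.index("|") (slices rest[:i] / rest[i+1:] are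
-- take/drop: i is a nonnegative in-range index); ValueError paths return [] (excluded by Pre_).
-- (fuel = rest.length bounds the loop so the recursion is structural; it never runs out)
def goB : Nat → List (List String) → List String → List (List String)
  | 0, _, _ => []
  | fuel + 1, segs, rest =>
    if "|" ∈ rest then
      let i := (PySem.List.index? rest "|").getD 0   -- rest.index("|"); the guard makes it a some
      let head := rest.take i
      if head = [] then []
      else goB fuel (segs ++ [head]) (rest.drop (i + 1))
    else if rest = [] then [] else segs ++ [rest]

def split_pipeline_alt (tokens : List String) : List (List String) :=
  goB tokens.length [] tokens

-- ===== PRECONDITION & SPEC =====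
-- no two adjacent tokens are both "|"
def pvNoAdjPipes : List String → Bool
  | a :: b :: ts => (!(a == "|" && b == "|")) && pvNoAdjPipes (b :: ts)
  | _ => true

-- Pre_ excludes exactly the inputs on which A raises ValueError: empty token lists and lists with
-- a leading, trailing or repeated "|" (an empty pipeline segment).
def Pre_split_pipeline (tokens : List String) : Prop :=
  tokens ≠ [] ∧ tokens.head? ≠ some "|" ∧ tokens.getLast? ≠ some "|" ∧ pvNoAdjPipes tokens = true

instance (tokens : List String) : Decidable (Pre_split_pipeline tokens) := by
  unfold Pre_split_pipeline; infer_instance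

def pvWitness_split_pipeline : List String := ["ls", "-l", "|", "wc"]

def Spec_split_pipeline (tokens : List String) (out : List (List String)) : Prop := out = split_pipeline_alt tokens
instance (tokens : List String) (out : List (List String)) : Decidable (Spec_split_pipeline tokens out) := by unfold Spec_split_pipeline; infer_instance

-- ===== CLAIM (what is proved, stated in full; the proofs are below) =====
def Claim_equal_split_pipeline : Prop := ∀ (tokens : List String), Dom_split_pipeline tokens → Pre_split_pipeline tokens → Spec_split_pipeline tokens (split_pipeline tokens)

-- ===== LEMMAS AND PROOFS =====

lemma noAdj_tail (a : String) (l : List String) (h : pvNoAdjPipes (a :: l) = true) :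
    pvNoAdjPipes l = true := by
  cases l with
  | nil => rfl
  | cons b ts => simp [pvNoAdjPipes] at h ⊢; exact h.2

lemma noAdj_suffix : ∀ (xs ys : List String), pvNoAdjPipes (xs ++ ys) = true → pvNoAdjPipes ys = true
  | [], _, h => h
  | a :: xs, ys, h => noAdj_suffix xs ys (noAdj_tail a _ h)

lemma goB_nopipe (l : List String) (segs : List (List String)) (f : Nat)
    (h : "|" ∉ l) (hne : l ≠ []) : goB (f + 1) segs l = segs ++ [l] := by
  simp [goB, h, hne]

lemma goB_pipe (cur ts : List String) (segs : List (List String)) (f : Nat)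
    (hc : "|" ∉ cur) (hne : cur ≠ []) :
    goB (f + 1) segs (cur ++ "|" :: ts) = goB f (segs ++ [cur]) ts := by
  have hmem : "|" ∈ cur ++ "|" :: ts := by simp
  have hidx : PySem.List.index? (cur ++ "|" :: ts) "|" = some cur.length :=
    (PySem.List.index?_eq_some_iff _ _ _).mpr ⟨cur, ts, rfl, rfl, hc⟩
  have htake : (cur ++ "|" :: ts).take cur.length = cur := by
    simp
  have hdrop : (cur ++ "|" :: ts).drop (cur.length + 1) = ts := by
    have : cur ++ "|" :: ts = (cur ++ ["|"]) ++ ts := by simp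
    rw [this]
    have hlen : (cur ++ ["|"]).length = cur.length + 1 := by simp
    rw [← hlen, List.drop_left]
  simp only [goB, hmem, if_pos, hidx, Option.getD_some, htake, hdrop, if_neg hne]

lemma goA_eq_goB : ∀ (ts cur : List String) (segs : List (List String)) (fuel : Nat),
    (cur ++ ts).length ≤ fuel → "|" ∉ cur → Pre_split_pipeline (cur ++ ts) →
    goA ts segs cur = goB fuel segs (cur ++ ts) := by
  intro ts
  induction ts with
  | nil =>
    intro cur segs fuel hf hc hpre
    rw [List.append_nil] at hpre hf ⊢
    have hne : cur ≠ [] := hpre.1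
    cases fuel with
    | zero =>
      exact absurd (List.length_eq_zero_iff.mp (Nat.le_zero.mp hf)) hne
    | succ f =>
      rw [goB_nopipe cur segs f hc hne]
      simp [goA, hne]
  | cons t ts ih =>
    intro cur segs fuel hf hc hpre
    by_cases ht : t = "|"
    · subst ht
      have hne : cur ≠ [] := by
        intro hcur; subst hcur
        exact hpre.2.1 (by simp)
      have hts : ts ≠ [] := by
        intro hts; subst hts
        exact hpre.2.2.1 (by rw [List.getLast?_append_cons]; rfl)
      have hnadj : pvNoAdjPipes ("|" :: ts) = true := noAdj_suffix cur _ hpre.2.2.2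
      have hpre' : Pre_split_pipeline ts := by
        refine ⟨hts, ?_, ?_, noAdj_tail _ _ hnadj⟩
        · cases ts with
          | nil => exact absurd rfl hts
          | cons y ys =>
            simp [pvNoAdjPipes] at hnadj
            simp [hnadj.1]
        · have h1 : (cur ++ "|" :: ts).getLast? = ("|" :: ts).getLast? :=
            List.getLast?_append_cons cur "|" ts
          have h2 : ("|" :: ts).getLast? = ts.getLast? := by
            cases ts with
            | nil => exact absurd rfl hts
            | cons y ys => exact List.getLast?_append_cons ["|"] y ys
          have := hpre.2.2.1
          rw [h1, h2] at this
          exact this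
      cases fuel with
      | zero => simp at hf
      | succ f =>
        rw [goB_pipe cur ts segs f hc hne]
        have hcl : 1 ≤ cur.length := by
          cases cur with
          | nil => exact absurd rfl hne
          | cons _ _ => simp
        have hf' : ([] ++ ts).length ≤ f := by simp at hf ⊢; omega
        have := ih [] (segs ++ [cur]) f hf' (by simp) (by simpa using hpre')
        simp at this
        simp [goA, hne, this]
    · have hc' : "|" ∉ cur ++ [t] := by
        simp [hc]
        exact fun h => ht h.symm
      have hassoc : cur ++ t :: ts = (cur ++ [t]) ++ ts := by simp
      have hpre' : Pre_split_pipeline ((cur ++ [t]) ++ ts) := by rwa [← hassoc]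
      have hf' : ((cur ++ [t]) ++ ts).length ≤ fuel := by
        rw [← hassoc]; simpa using hf
      have := ih (cur ++ [t]) segs fuel hf' hc' hpre'
      rw [hassoc]
      simpa [goA, ht] using this

-- ===== VERDICT (by name: the statement is the Claim_ definition above) =====
theorem split_pipeline_spec : Claim_equal_split_pipeline := by
  intro tokens _ hpre
  unfold Spec_split_pipeline split_pipeline split_pipeline_alt
  exact goA_eq_goB tokens [] [] tokens.length (by simp) (by simp) (by simpa using hpre)
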